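-- pv_equiv track=rewrite | github.com/oarbel11/tracepipe_ai | scripts/peer_review/lineage_graph_optimizer.py | _bfs_cluster
-- ===== SOURCE A (Python) =====
-- from typing import Dict, List, Set, Tuple, Optional
--
-- def _bfs_cluster(lineage: Dict[str, List[str]], start: str,
--                 max_size: int, visited: Set[str]) -> Tuple[Set[str], List[Tuple[str, str]]]:
--     nodes = set()
--     edges = []
--     queue = [start]
--
--     while queue and len(nodes) < max_size:
--         node = queue.pop(0)
--         if node in visited:
--             continue
--         visited.add(node)
--         nodes.add(node)
--
--         for child in lineage.get(node, []):
--             edges.append((node, child))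
--             if child not in visited and len(nodes) < max_size:
--                 queue.append(child)
--
--     return nodes, edges
-- ===== SOURCE B (Python) =====
-- def _bfs_cluster(lineage, start, max_size, visited):
--     # Level-order (frontier) BFS: iterate the current level, build a fresh next level.
--     # Mutates `visited` in place exactly like the original.
--     nodes = set()
--     edges = []
--     current = [start]
--     while current and len(nodes) < max_size:
--         next_level = []
--         for node in current:
--             if len(nodes) >= max_size:
--                 break
--             if node in visited:
--                 continue
--             visited.add(node)
--             nodes.add(node)
--             for child in lineage.get(node, []):
--                 edges.append((node, child))
--                 if child not in visited and len(nodes) < max_size: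
--                     next_level.append(child)
--         current = next_level
--     return nodes, edges
-- ===== Notes on version B (the rewrite author's own statement) =====
-- stated objective: alternative
-- what changed: Replaced the single mutable FIFO queue (pop(0)/append) by level-order BFS over per-level frontier lists: iterate the current frontier and build a fresh next_level each pass; nodes are visited in the same order, so nodes/edges/visited come out identical.
import Mathlib
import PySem

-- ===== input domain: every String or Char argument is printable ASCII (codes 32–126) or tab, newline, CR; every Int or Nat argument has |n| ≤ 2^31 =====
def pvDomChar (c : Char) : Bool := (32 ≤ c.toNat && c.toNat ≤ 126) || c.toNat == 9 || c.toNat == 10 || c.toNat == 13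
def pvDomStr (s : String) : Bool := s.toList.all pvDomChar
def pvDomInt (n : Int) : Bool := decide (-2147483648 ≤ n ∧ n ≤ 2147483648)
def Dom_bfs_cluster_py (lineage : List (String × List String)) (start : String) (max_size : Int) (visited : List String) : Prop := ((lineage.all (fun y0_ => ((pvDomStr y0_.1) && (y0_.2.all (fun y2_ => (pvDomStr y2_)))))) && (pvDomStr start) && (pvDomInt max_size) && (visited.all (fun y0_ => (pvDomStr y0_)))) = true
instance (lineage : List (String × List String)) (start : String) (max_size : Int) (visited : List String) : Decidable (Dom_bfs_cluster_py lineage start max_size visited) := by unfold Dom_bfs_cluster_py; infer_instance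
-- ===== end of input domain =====

-- B replaces A's pop(0) FIFO queue by level-order frontier BFS (fresh next_level list per pass);
-- equivalence is about the RETURN value only (both Pythons mutate `visited` in place identically).

-- shared helper: Python dict lookup `lineage.get(node, [])` on the association list (first match)
def pvGetD : List (String × List String) → String → List String
  | [], _ => []
  | (k, v) :: rest, key => if k == key then v else pvGetD rest key

-- shared helper: the child-enqueue test `child not in visited and len(nodes) < max_size`
def pvKeep (v2 ns2 : List String) (max_size : Int) (c : String) : Bool :=
  !(PySem.Set.contains v2 c) && decide ((ns2.length : Int) < max_size)

-- all children anywhere in the lineage (universe for the termination measure)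
def pvUniv (lineage : List (String × List String)) : List String :=
  lineage.flatMap Prod.snd

theorem pvGetD_subset (lineage : List (String × List String)) (key : String) :
    ∀ x ∈ pvGetD lineage key, x ∈ pvUniv lineage := by
  induction lineage with
  | nil => simp [pvGetD]
  | cons p rest ih =>
    intro x hx
    simp only [pvGetD] at hx
    simp only [pvUniv, List.flatMap_cons, List.mem_append]
    split at hx
    · exact Or.inl hx
    · exact Or.inr (ih x hx)

theorem pvGetD_len (lineage : List (String × List String)) (key : String) :
    (pvGetD lineage key).length ≤ (pvUniv lineage).length := by
  induction lineage with
  | nil => simp [pvGetD, pvUniv]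
  | cons p rest ih =>
    simp only [pvGetD, pvUniv, List.flatMap_cons, List.length_append]
    split
    · omega
    · simp only [pvUniv] at ih; omega

-- termination measure ingredient: number of not-yet-visited candidate nodes
def pvC (lineage : List (String × List String)) (l v : List String) : Nat :=
  ((l ++ pvUniv lineage).toFinset.filter (fun x => x ∉ v)).card

theorem pvC_le (lineage : List (String × List String)) {l1 l2 v1 v2 : List String}
    (hl : ∀ x ∈ l1, x ∈ l2 ∨ x ∈ pvUniv lineage) (hv : ∀ x ∈ v1, x ∈ v2) :
    pvC lineage l1 v2 ≤ pvC lineage l2 v1 := by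
  apply Finset.card_le_card
  intro x hx
  simp only [Finset.mem_filter, List.mem_toFinset, List.mem_append] at hx ⊢
  obtain ⟨hm, hnv⟩ := hx
  refine ⟨?_, fun h => hnv (hv x h)⟩
  rcases hm with h | h
  · rcases hl x h with h' | h'
    · exact Or.inl h'
    · exact Or.inr h'
  · exact Or.inr h

theorem pvC_lt (lineage : List (String × List String)) {l1 l2 v1 v2 : List String} {node : String}
    (hnl : node ∈ l2 ∨ node ∈ pvUniv lineage) (hnv : node ∉ v1) (hn2 : node ∈ v2)
    (hl : ∀ x ∈ l1, x ∈ l2 ∨ x ∈ pvUniv lineage) (hv : ∀ x ∈ v1, x ∈ v2) :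
    pvC lineage l1 v2 + 1 ≤ pvC lineage l2 v1 := by
  have hmem : node ∈ (l2 ++ pvUniv lineage).toFinset.filter (fun x => x ∉ v1) := by
    simp only [Finset.mem_filter, List.mem_toFinset, List.mem_append]
    exact ⟨hnl, hnv⟩
  have hsub : (l1 ++ pvUniv lineage).toFinset.filter (fun x => x ∉ v2) ⊆
      ((l2 ++ pvUniv lineage).toFinset.filter (fun x => x ∉ v1)).erase node := by
    intro x hx
    simp only [Finset.mem_filter, List.mem_toFinset, List.mem_append, Finset.mem_erase] at hx ⊢
    obtain ⟨hm, hxv⟩ := hx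
    refine ⟨fun h => hxv (h ▸ hn2), ?_, fun h => hxv (hv x h)⟩
    rcases hm with h | h
    · rcases hl x h with h' | h'
      · exact Or.inl h'
      · exact Or.inr h'
    · exact Or.inr h
  have h1 := Finset.card_le_card hsub
  have h2 := Finset.card_erase_of_mem hmem
  have h3 := Finset.card_pos.mpr ⟨node, hmem⟩
  unfold pvC
  omega

theorem pv_add_mem (v : List String) (x : String) : x ∈ PySem.Set.add v x := by
  simp [PySem.Set.mem_add]

theorem pv_add_super (v : List String) (x : String) : ∀ y ∈ v, y ∈ PySem.Set.add v x := by
  intro y hy; simp [PySem.Set.mem_add, hy]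

-- characterisation of the child loop (edges appended, keepable children appended)
theorem pv_foldl_char (node : String) (max_size : Int) (v2 ns2 : List String) :
    ∀ (children : List String) (es : List (String × String)) (q : List String),
    children.foldl
      (fun (st : List (String × String) × List String) child =>
        (st.1 ++ [(node, child)],
         if pvKeep v2 ns2 max_size child then st.2 ++ [child] else st.2)) (es, q)
    = (es ++ children.map (fun c => (node, c)), q ++ children.filter (pvKeep v2 ns2 max_size)) := by
  intro children
  induction children with
  | nil => simp
  | cons c rest ih =>
    intro es q
    simp only [List.foldl_cons, List.map_cons, List.filter_cons]
    rw [ih]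
    cases h : pvKeep v2 ns2 max_size c <;> simp [List.append_assoc]

-- ===== PORT A =====
-- A's while-loop: state (queue, visited, nodes, edges); pop(0), children appended to queue end
def loopA (lineage : List (String × List String)) (max_size : Int) :
    List String → List String → List String → List (String × String) →
    List String × List (String × String)
  | [], _, nodes, edges => (nodes, edges)
  | node :: rest, visited, nodes, edges =>
    if (nodes.length : Int) < max_size then
      if PySem.Set.contains visited node then
        loopA lineage max_size rest visited nodes edges
      else
        loopA lineage max_size
          ((pvGetD lineage node).foldl
            (fun (st : List (String × String) × List String) child =>
              (st.1 ++ [(node, child)],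
               if pvKeep (PySem.Set.add visited node) (PySem.Set.add nodes node) max_size child
               then st.2 ++ [child] else st.2)) (edges, rest)).2
          (PySem.Set.add visited node) (PySem.Set.add nodes node)
          ((pvGetD lineage node).foldl
            (fun (st : List (String × String) × List String) child =>
              (st.1 ++ [(node, child)],
               if pvKeep (PySem.Set.add visited node) (PySem.Set.add nodes node) max_size child
               then st.2 ++ [child] else st.2)) (edges, rest)).1
    else (nodes, edges)
  termination_by queue visited _ _ =>
    ((pvUniv lineage).length + 1) * pvC lineage queue visited + queue.length
  decreasing_by
  · have hc : pvC lineage rest visited ≤ pvC lineage (node :: rest) visited :=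
      pvC_le lineage (fun x hx => Or.inl (List.mem_cons_of_mem _ hx)) (fun _ h => h)
    have := Nat.mul_le_mul_left ((pvUniv lineage).length + 1) hc
    simp only [List.length_cons]; omega
  · rename_i _ h2
    simp only [dite_eq_ite, pv_foldl_char]
    have hnode : node ∉ visited := by
      simpa [PySem.Set.contains_iff] using h2
    have hc : pvC lineage
          (rest ++ (pvGetD lineage node).filter
            (pvKeep (PySem.Set.add visited node) (PySem.Set.add nodes node) max_size))
          (PySem.Set.add visited node) + 1
        ≤ pvC lineage (node :: rest) visited := by
      apply pvC_lt lineage (node := node)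
      · exact Or.inl List.mem_cons_self
      · exact hnode
      · exact pv_add_mem visited node
      · intro x hx
        rcases List.mem_append.mp hx with h | h
        · exact Or.inl (List.mem_cons_of_mem _ h)
        · exact Or.inr (pvGetD_subset lineage node x (List.mem_of_mem_filter h))
      · exact pv_add_super visited node
    have hflen : ((pvGetD lineage node).filter
          (pvKeep (PySem.Set.add visited node) (PySem.Set.add nodes node) max_size)).length
        ≤ (pvUniv lineage).length :=
      le_trans (List.length_filter_le _ _) (pvGetD_len lineage node)
    have key := Nat.mul_le_mul_left ((pvUniv lineage).length + 1) hc
    simp only [Nat.mul_add, Nat.mul_one, List.length_append, List.length_cons] at key ⊢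
    omega

def bfs_cluster_py (lineage : List (String × List String)) (start : String) (max_size : Int) (visited : List String) : List String × (List (String × String)) :=
  loopA lineage max_size [start] visited [] []

-- ===== PORT B =====
-- B's inner `for node in current` loop: breaks when nodes is full, accumulates next_level
def innerB (lineage : List (String × List String)) (max_size : Int) :
    List String → List String → List String → List (String × String) → List String →
    List String × List String × List (String × String) × List String
  | [], visited, nodes, edges, next_level => (visited, nodes, edges, next_level)
  | node :: rest, visited, nodes, edges, next_level =>
    if (nodes.length : Int) < max_size then
      if PySem.Set.contains visited node then
        innerB lineage max_size rest visited nodes edges next_level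
      else
        innerB lineage max_size rest (PySem.Set.add visited node) (PySem.Set.add nodes node)
          ((pvGetD lineage node).foldl
            (fun (st : List (String × String) × List String) child =>
              (st.1 ++ [(node, child)],
               if pvKeep (PySem.Set.add visited node) (PySem.Set.add nodes node) max_size child
               then st.2 ++ [child] else st.2)) (edges, next_level)).1
          ((pvGetD lineage node).foldl
            (fun (st : List (String × String) × List String) child =>
              (st.1 ++ [(node, child)],
               if pvKeep (PySem.Set.add visited node) (PySem.Set.add nodes node) max_size child
               then st.2 ++ [child] else st.2)) (edges, next_level)).2
    else (visited, nodes, edges, next_level)   -- break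

-- measure bound for the outer loop of B (termination lemma, cited by loopB's decreasing_by)
theorem innerB_meas (lineage : List (String × List String)) (max_size : Int) :
    ∀ (cur v ns : List String) (es : List (String × String)) (nx : List String),
    ((pvUniv lineage).length + 1) * pvC lineage (innerB lineage max_size cur v ns es nx).2.2.2
        (innerB lineage max_size cur v ns es nx).1
      + (innerB lineage max_size cur v ns es nx).2.2.2.length
    ≤ ((pvUniv lineage).length + 1) * pvC lineage (cur ++ nx) v + nx.length := by
  intro cur
  induction cur with
  | nil => intro v ns es nx; simp [innerB]
  | cons node rest ih =>
    intro v ns es nx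
    simp only [innerB]
    split
    · split
      · refine le_trans (ih v ns es nx) ?_
        have hc : pvC lineage (rest ++ nx) v ≤ pvC lineage (node :: rest ++ nx) v :=
          pvC_le lineage (fun x hx => Or.inl (List.mem_cons_of_mem _ hx)) (fun _ h => h)
        have := Nat.mul_le_mul_left ((pvUniv lineage).length + 1) hc
        omega
      · rename_i hfull hvis
        simp only [pv_foldl_char]
        have hnode : node ∉ v := by simpa [PySem.Set.contains_iff] using hvis
        refine le_trans (ih _ _ _ _) ?_
        have hc : pvC lineage
              (rest ++ (nx ++ (pvGetD lineage node).filter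
                (pvKeep (PySem.Set.add v node) (PySem.Set.add ns node) max_size)))
              (PySem.Set.add v node) + 1
            ≤ pvC lineage (node :: rest ++ nx) v := by
          apply pvC_lt lineage (node := node)
          · exact Or.inl List.mem_cons_self
          · exact hnode
          · exact pv_add_mem v node
          · intro x hx
            rcases List.mem_append.mp hx with h | h
            · exact Or.inl (List.mem_cons_of_mem _ (List.mem_append_left _ h))
            · rcases List.mem_append.mp h with h' | h'
              · exact Or.inl (List.mem_cons_of_mem _ (List.mem_append_right _ h'))
              · exact Or.inr (pvGetD_subset lineage node x (List.mem_of_mem_filter h'))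
          · exact pv_add_super v node
        have hflen : ((pvGetD lineage node).filter
              (pvKeep (PySem.Set.add v node) (PySem.Set.add ns node) max_size)).length
            ≤ (pvUniv lineage).length :=
          le_trans (List.length_filter_le _ _) (pvGetD_len lineage node)
        have key := Nat.mul_le_mul_left ((pvUniv lineage).length + 1) hc
        simp only [Nat.mul_add, Nat.mul_one, List.length_append] at key ⊢
        omega
    · have hc : pvC lineage nx v ≤ pvC lineage (node :: rest ++ nx) v :=
        pvC_le lineage (fun x hx => Or.inl (List.mem_cons_of_mem _ (List.mem_append_right _ hx)))
          (fun _ h => h)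
      have := Nat.mul_le_mul_left ((pvUniv lineage).length + 1) hc
      show ((pvUniv lineage).length + 1) * pvC lineage nx v + nx.length ≤ _
      omega

-- B's outer `while current and len(nodes) < max_size` loop
def loopB (lineage : List (String × List String)) (max_size : Int) :
    List String → List String → List String → List (String × String) →
    List String × List (String × String)
  | current, visited, nodes, edges =>
    if current ≠ [] ∧ ((nodes.length : Int) < max_size) then
      loopB lineage max_size
        (innerB lineage max_size current visited nodes edges []).2.2.2
        (innerB lineage max_size current visited nodes edges []).1
        (innerB lineage max_size current visited nodes edges []).2.1
        (innerB lineage max_size current visited nodes edges []).2.2.1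
    else (nodes, edges)
  termination_by current visited _ _ =>
    ((pvUniv lineage).length + 1) * pvC lineage current visited + current.length
  decreasing_by
  · rename_i h
    have hb := innerB_meas lineage max_size current visited nodes edges []
    simp only [List.append_nil, List.length_nil, Nat.add_zero] at hb
    have hlen : 1 ≤ current.length := by
      cases hcur : current with
      | nil => exact absurd hcur h.1
      | cons a l => simp
    omega

def bfs_cluster_py_alt (lineage : List (String × List String)) (start : String) (max_size : Int) (visited : List String) : List String × (List (String × String)) :=
  loopB lineage max_size [start] visited [] []

-- ===== PRECONDITION & SPEC =====
def Spec_bfs_cluster_py (lineage : List (String × List String)) (start : String) (max_size : Int) (visited : List String) (out : List String × (List (String × String))) : Prop := out = bfs_cluster_py_alt lineage start max_size visited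
instance (lineage : List (String × List String)) (start : String) (max_size : Int) (visited : List String) (out : List String × (List (String × String))) : Decidable (Spec_bfs_cluster_py lineage start max_size visited out) := by unfold Spec_bfs_cluster_py; infer_instance

-- ===== CLAIM (what is proved, stated in full; the proofs are below) =====
def Claim_equal_bfs_cluster_py : Prop := ∀ (lineage : List (String × List String)) (start : String) (max_size : Int) (visited : List String), Dom_bfs_cluster_py lineage start max_size visited → Spec_bfs_cluster_py lineage start max_size visited (bfs_cluster_py lineage start max_size visited)

-- ===== LEMMAS AND PROOFS =====

theorem loopA_full (lineage : List (String × List String)) (max_size : Int)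
    (q v ns : List String) (es : List (String × String))
    (h : ¬ ((ns.length : Int) < max_size)) :
    loopA lineage max_size q v ns es = (ns, es) := by
  cases q <;> simp [loopA, h]

-- next_level is a pure accumulator of innerB
theorem innerB_acc (lineage : List (String × List String)) (max_size : Int) :
    ∀ (cur v ns : List String) (es : List (String × String)) (nx : List String),
    innerB lineage max_size cur v ns es nx =
      ((innerB lineage max_size cur v ns es []).1,
       (innerB lineage max_size cur v ns es []).2.1,
       (innerB lineage max_size cur v ns es []).2.2.1,
       nx ++ (innerB lineage max_size cur v ns es []).2.2.2) := by
  intro cur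
  induction cur with
  | nil => intro v ns es nx; simp [innerB]
  | cons node rest ih =>
    intro v ns es nx
    simp only [innerB]
    split
    · split
      · exact ih v ns es nx
      · simp only [pv_foldl_char, List.nil_append]
        rw [ih, ih (PySem.Set.add v node) (PySem.Set.add ns node)
            (es ++ (pvGetD lineage node).map (fun c => (node, c)))
            ((pvGetD lineage node).filter
              (pvKeep (PySem.Set.add v node) (PySem.Set.add ns node) max_size))]
        simp [List.append_assoc]
    · simp

-- main lemma: A's FIFO processing of cur ++ rest = B's inner pass over cur, then A on rest ++ next
theorem loopA_innerB (lineage : List (String × List String)) (max_size : Int) :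
    ∀ (cur rest v ns : List String) (es : List (String × String)),
    loopA lineage max_size (cur ++ rest) v ns es =
      loopA lineage max_size (rest ++ (innerB lineage max_size cur v ns es []).2.2.2)
        (innerB lineage max_size cur v ns es []).1
        (innerB lineage max_size cur v ns es []).2.1
        (innerB lineage max_size cur v ns es []).2.2.1 := by
  intro cur
  induction cur with
  | nil => intro rest v ns es; simp [innerB]
  | cons node cur' ih =>
    intro rest v ns es
    simp only [List.cons_append]
    by_cases h1 : (ns.length : Int) < max_size
    · by_cases h2 : PySem.Set.contains v node = true
      · simp only [loopA, innerB, if_pos h1, if_pos h2]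
        exact ih rest v ns es
      · simp only [loopA, innerB, if_pos h1, if_neg h2, pv_foldl_char, List.nil_append]
        rw [List.append_assoc,
            ih (rest ++ (pvGetD lineage node).filter
              (pvKeep (PySem.Set.add v node) (PySem.Set.add ns node) max_size))
              (PySem.Set.add v node) (PySem.Set.add ns node)
              (es ++ (pvGetD lineage node).map (fun c => (node, c))),
            innerB_acc lineage max_size cur' (PySem.Set.add v node) (PySem.Set.add ns node)
              (es ++ (pvGetD lineage node).map (fun c => (node, c)))
              ((pvGetD lineage node).filter
                (pvKeep (PySem.Set.add v node) (PySem.Set.add ns node) max_size))]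
        simp [List.append_assoc]
    · rw [loopA_full lineage max_size _ _ _ _ h1]
      simp only [innerB, if_neg h1]
      rw [loopA_full lineage max_size _ _ _ _ h1]

theorem loopA_eq_loopB (lineage : List (String × List String)) (max_size : Int) :
    ∀ (cur v ns : List String) (es : List (String × String)),
    loopA lineage max_size cur v ns es = loopB lineage max_size cur v ns es := by
  intro cur v ns es
  induction cur, v, ns, es using loopB.induct (lineage := lineage) (max_size := max_size) with
  | case1 current visited nodes edges h ihl =>
      have hmain := loopA_innerB lineage max_size current [] visited nodes edges
      simp only [List.append_nil, List.nil_append] at hmain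
      rw [hmain]
      rw [ihl]
      conv_rhs => rw [loopB]
      simp only [if_pos h]
  | case2 current visited nodes edges h =>
      conv_rhs => rw [loopB]
      simp only [if_neg h]
      by_cases hc : current = []
      · subst hc; simp [loopA]
      · have h1 : ¬ ((nodes.length : Int) < max_size) := by tauto
        exact loopA_full lineage max_size current visited nodes edges h1

-- ===== VERDICT (by name: the statement is the Claim_ definition above) =====
theorem bfs_cluster_py_spec : Claim_equal_bfs_cluster_py := by
  intro lineage start max_size visited _
  unfold Spec_bfs_cluster_py bfs_cluster_py bfs_cluster_py_alt
  exact loopA_eq_loopB lineage max_size [start] visited [] []
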